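-- pv_equiv track=rewrite | github.com/sofia285/FP | teste.py | digitos
-- ===== SOURCE A (Python) =====
-- def digitos(n):
--     tup = ()
--     if not isinstance(n,int) or n < 0:
--         raise ValueError('argumentos inválidos')
--     while n > 0:
--         digito = n % 10
--         tup = (digito,) + tup
--         n = n // 10
--     return tup
-- ===== SOURCE B (Python) =====
-- def digitos(n):
--     if not isinstance(n, int) or n < 0:
--         raise ValueError('argumentos inválidos')
--     # read the digits off the decimal string instead of repeated divmod;
--     # int(n) normalises bool inputs to 0/1 before stringifying
--     return tuple(ord(c) - ord('0') for c in str(int(n)))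
-- ===== Notes on version B (the rewrite author's own statement) =====
-- stated objective: idiomatic
-- what changed: B keeps the validation guard but derives the digits from the decimal string str(n) in one left-to-right pass instead of A's right-to-left divmod loop that prepends to a growing tuple.
-- intended difference: For n == 0 A returns the empty tuple while B returns (0,), the standard single-digit decimal representation of zero. — e.g. on digitos(0): A returns [], B returns [0]
import Mathlib
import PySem

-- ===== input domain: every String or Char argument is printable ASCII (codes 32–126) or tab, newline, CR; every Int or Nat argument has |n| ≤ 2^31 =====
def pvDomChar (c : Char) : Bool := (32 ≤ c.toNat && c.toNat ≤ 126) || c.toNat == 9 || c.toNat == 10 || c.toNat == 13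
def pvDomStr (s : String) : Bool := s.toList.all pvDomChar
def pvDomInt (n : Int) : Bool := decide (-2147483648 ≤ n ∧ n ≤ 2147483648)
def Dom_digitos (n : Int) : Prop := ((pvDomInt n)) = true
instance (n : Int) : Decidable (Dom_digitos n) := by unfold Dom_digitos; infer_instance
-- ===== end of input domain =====

-- B reads the digits off the decimal string in one pass instead of A's divmod loop (return-value
-- equivalence on 0 < n; A raises ValueError on n < 0; at n = 0, A returns () and B the intended (0,)).


-- ===== PORT A =====
-- while n > 0: tup = (n % 10,) + tup; n = n // 10
def digitosLoop (n : Int) (tup : List Int) : List Int :=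
  if _h : n > 0 then
    digitosLoop (PySem.Int.floordiv n 10) (PySem.Int.mod n 10 :: tup)
  else
    tup
termination_by n.toNat
decreasing_by
  rw [PySem.Int.floordiv_eq_ediv_of_pos (by norm_num)]
  omega

def digitos (n : Int) : List Int := digitosLoop n []

-- ===== PORT B =====
-- tuple(ord(c) - ord('0') for c in str(int(n)))  (int(n) is the identity on Int)
def digitos_alt (n : Int) : List Int :=
  (PySem.Int.toChars n).map (fun c => (c.toNat : Int) - 48)

-- ===== PRECONDITION & SPEC =====
-- A raises ValueError exactly on n < 0
def Pre_digitos (n : Int) : Prop := 0 ≤ n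
instance (n : Int) : Decidable (Pre_digitos n) := by unfold Pre_digitos; infer_instance
def pvWitness_digitos : Int := 5

-- For n == 0 A returns the empty tuple while B returns (0,), the standard single-digit
-- decimal representation of zero.
def D_digitos (n : Int) : Prop := n = 0
instance (n : Int) : Decidable (D_digitos n) := by unfold D_digitos; infer_instance

def Spec_digitos (n : Int) (out : List Int) : Prop := ¬ D_digitos n → out = digitos_alt n
instance (n : Int) (out : List Int) : Decidable (Spec_digitos n out) := by unfold Spec_digitos; infer_instance

def pvDiffWitness_digitos : Int := 0
def pvDiffWitnessOut_digitos : (List Int) × (List Int) := ([], [0])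

-- ===== CLAIM (what is proved, stated in full; the proofs are below) =====
def Claim_unchanged_digitos : Prop := ∀ (n : Int), Dom_digitos n → Pre_digitos n → Spec_digitos n (digitos n)
def Claim_changed_digitos : Prop := Dom_digitos (pvDiffWitness_digitos) ∧ Pre_digitos (pvDiffWitness_digitos) ∧ D_digitos (pvDiffWitness_digitos) ∧ digitos (pvDiffWitness_digitos) = pvDiffWitnessOut_digitos.1 ∧ digitos_alt (pvDiffWitness_digitos) = pvDiffWitnessOut_digitos.2 ∧ pvDiffWitnessOut_digitos.1 ≠ pvDiffWitnessOut_digitos.2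
def Claim_exact_digitos : Prop := ∀ (n : Int), Dom_digitos n → Pre_digitos n → D_digitos n → digitos n ≠ digitos_alt n

-- ===== LEMMAS AND PROOFS =====

-- A's loop accumulates exactly the base-10 digits, most significant first.
lemma digitosLoop_eq (m : Nat) : ∀ acc : List Int,
    digitosLoop (m : Int) acc = (Nat.digits 10 m).reverse.map (fun d => (d : Int)) ++ acc := by
  induction m using Nat.strong_induction_on with
  | _ m ih =>
    intro acc
    rcases Nat.eq_zero_or_pos m with hm | hm
    · subst hm
      rw [digitosLoop]
      simp
    · rw [digitosLoop]
      have hpos : (m : Int) > 0 := by exact_mod_cast hm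
      rw [dif_pos hpos,
        (by exact_mod_cast PySem.Int.floordiv_natCast m 10 :
          PySem.Int.floordiv (m : Int) 10 = ((m / 10 : Nat) : Int)),
        (by exact_mod_cast PySem.Int.mod_natCast m 10 :
          PySem.Int.mod (m : Int) 10 = ((m % 10 : Nat) : Int)),
        ih (m / 10) (Nat.div_lt_self hm (by norm_num)) _,
        Nat.digits_def' (by norm_num : 1 < 10) hm]
      simp

-- the digit characters produced by toDigitsCore map back to their values under c ↦ c.toNat - 48
lemma digitChar_val (d : Nat) (hd : d < 10) :
    ((Nat.digitChar d).toNat : Int) - 48 = (d : Int) := by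
  interval_cases d <;> decide

lemma toDigitsCore_map (f : Nat) : ∀ (m : Nat) (acc : List Char), 0 < f → m < 10 ^ f →
    (Nat.toDigitsCore 10 f m acc).map (fun c => (c.toNat : Int) - 48) =
      (if m = 0 then [(0 : Int)] else (Nat.digits 10 m).reverse.map (fun d => (d : Int)))
        ++ acc.map (fun c => (c.toNat : Int) - 48) := by
  induction f with
  | zero => intro m acc hf; omega
  | succ f ih =>
    intro m acc _ hm
    rw [Nat.toDigitsCore]
    by_cases h0 : m / 10 = 0
    · have hm10 : m < 10 := by omega
      rw [if_pos h0, List.map_cons, digitChar_val _ (Nat.mod_lt m (by norm_num))]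
      rcases Nat.eq_zero_or_pos m with hz | hp
      · subst hz; simp
      · rw [if_neg (by omega), Nat.digits_def' (by norm_num : 1 < 10) hp, h0]
        simp
    · have hf : 0 < f := by
        rcases Nat.eq_zero_or_pos f with hz | h; · subst hz; omega
        · exact h
      have hmf : m / 10 < 10 ^ f := by
        rw [Nat.div_lt_iff_lt_mul (by norm_num)]
        calc m < 10 ^ (f + 1) := hm
        _ = 10 ^ f * 10 := by ring
      rw [if_neg h0, ih (m / 10) _ hf hmf, if_neg h0,
        if_neg (show ¬ m = 0 by omega),
        Nat.digits_def' (by norm_num : 1 < 10) (by omega : 0 < m)]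
      simp [digitChar_val _ (Nat.mod_lt m (by norm_num))]

lemma digitos_alt_eq (m : Nat) (hm : 0 < m) :
    digitos_alt (m : Int) = (Nat.digits 10 m).reverse.map (fun d => (d : Int)) := by
  unfold digitos_alt PySem.Int.toChars
  rw [if_neg (by omega), Nat.toDigits]
  simp only [Int.toNat_natCast]
  rw [
    toDigitsCore_map (m + 1) m [] (by omega)
      ((Nat.lt_pow_self (by norm_num : 1 < 10) (n := m)).trans_le
        (Nat.pow_le_pow_right (by norm_num) (by omega))),
    if_neg (by omega : ¬ m = 0)]
  simp

-- ===== VERDICT (by name: the statement is the Claim_ definition above) =====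
theorem digitos_spec : Claim_unchanged_digitos := by
  intro n _ hpre hD
  have hpos : 0 < n := lt_of_le_of_ne hpre (fun h => hD h.symm)
  obtain ⟨m, rfl⟩ : ∃ m : Nat, n = (m : Int) := ⟨n.toNat, (Int.toNat_of_nonneg hpre).symm⟩
  have hm : 0 < m := by exact_mod_cast hpos
  show digitosLoop (m : Int) [] = digitos_alt (m : Int)
  rw [digitosLoop_eq m [], digitos_alt_eq m hm, List.append_nil]

lemma digitos_zero : digitos 0 = [] := by
  unfold digitos
  rw [digitosLoop]
  norm_num

theorem digitos_changed : Claim_changed_digitos := by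
  unfold Claim_changed_digitos
  refine ⟨by decide, by decide, by decide, ?_, by decide, by decide⟩
  exact digitos_zero

theorem digitos_tight : Claim_exact_digitos := by
  intro n _ _ hD
  subst hD
  rw [digitos_zero]
  decide
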